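-- pv_equiv track=rewrite | github.com/MudabbirulSaad/Assignment2forAi | dfs_search.py | dfs
-- ===== SOURCE A (Python) =====
-- def dfs(origin, destinations, edges):
--     """
--     Depth-First Search implementation.
--     - Expands nodes in ascending order when equal
--     - Maintains chronological order for equal priority nodes
--     - Tracks number of nodes generated
--     """
--     stack = [(origin, [origin])]  # Store node and its path
--     visited = set()
--     nodes_generated = 0
--
--     while stack:
--         current, path = stack.pop()
--         if current in visited:
--             continue
--
--         visited.add(current)
--         nodes_generated += 1
--
--         if current in destinations:
--             return current, nodes_generated, path
--
--         # Get neighbors and sort in descending order (since we're using a stack)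
--         # This ensures we process smaller numbers first when expanding
--         neighbors = sorted(edges.get(current, []), key=lambda x: x[0], reverse=True)
--
--         for neighbor, _ in neighbors:
--             if neighbor not in visited:
--                 new_path = path + [neighbor]
--                 stack.append((neighbor, new_path))
--
--     return None, nodes_generated, []
-- ===== SOURCE B (Python) =====
-- def dfs(origin, destinations, edges):
--     """Recursive DFS: a visit(node, path) helper shares the visited set and
--     node counter, expanding neighbors in ascending order and propagating the
--     first found destination upward."""
--     visited = set()
--     nodes_generated = 0
--
--     def visit(node, path):
--         nonlocal nodes_generated
--         if node in visited:
--             return None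
--         visited.add(node)
--         nodes_generated += 1
--         if node in destinations:
--             return (node, nodes_generated, path)
--         for neighbor, _ in sorted(edges.get(node, []), key=lambda x: x[0]):
--             if neighbor not in visited:
--                 found = visit(neighbor, path + [neighbor])
--                 if found is not None:
--                     return found
--         return None
--
--     res = visit(origin, [origin])
--     return res if res is not None else (None, nodes_generated, [])
-- ===== Notes on version B (the rewrite author's own statement) =====
-- stated objective: alternative
-- what changed: Replaces the explicit stack loop (entries carrying paths, descending-sorted pushes, visited check at pop) with a recursive visit(node, path) helper that shares the visited set and node counter, expands neighbors in ascending order, and propagates the first found destination upward; the unfound case falls out of the recursion instead of a drained stack.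
import Mathlib
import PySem

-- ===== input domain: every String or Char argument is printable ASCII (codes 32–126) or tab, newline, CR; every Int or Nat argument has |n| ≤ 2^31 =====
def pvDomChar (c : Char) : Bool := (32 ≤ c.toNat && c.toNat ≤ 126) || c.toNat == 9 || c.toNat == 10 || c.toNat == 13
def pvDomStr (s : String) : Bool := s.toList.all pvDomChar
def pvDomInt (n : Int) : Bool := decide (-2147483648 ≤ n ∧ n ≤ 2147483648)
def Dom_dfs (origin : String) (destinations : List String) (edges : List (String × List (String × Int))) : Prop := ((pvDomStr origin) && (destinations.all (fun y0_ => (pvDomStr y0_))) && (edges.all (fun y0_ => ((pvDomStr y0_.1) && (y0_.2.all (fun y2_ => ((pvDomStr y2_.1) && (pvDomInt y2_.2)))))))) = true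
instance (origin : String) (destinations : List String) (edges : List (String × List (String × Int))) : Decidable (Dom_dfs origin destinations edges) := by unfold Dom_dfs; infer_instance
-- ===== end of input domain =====

-- B replaces A's explicit stack loop by a recursive visit(node, path) helper threading the
-- visited set and counter (a different decomposition; not claimed faster).
-- The proofs below carry a fixed universe `pvUniv` of node names and proof arguments on the
-- loop helpers only for TERMINATION; they do not affect the computed values.

-- ===== PORT A =====
-- universe of all node names that can ever appear on the stack (for termination only)
def pvUniv (origin : String) (edges : List (String × List (String × Int))) : List String :=
  origin :: edges.flatMap (fun p => p.2.map Prod.fst)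

-- number of universe nodes not yet visited (the termination measure's first component)
def pvUnvis (U : List String) (s : PySem.Set String) : Nat :=
  (U.filter (fun x => !(PySem.Set.contains s x))).length

theorem pvContains_iff (s : PySem.Set String) (x : String) :
    PySem.Set.contains s x = true ↔ x ∈ s := by
  simp [PySem.Set.contains]

theorem pvFilter_length_le {p q : String → Bool} (U : List String)
    (himp : ∀ x, q x = true → p x = true) :
    (U.filter q).length ≤ (U.filter p).length := by
  induction U with
  | nil => simp
  | cons a t ih =>
    by_cases hq : q a = true
    · simp [hq, himp a hq]; omega
    · simp only [Bool.not_eq_true] at hq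
      rw [List.filter_cons, List.filter_cons, hq]
      cases hp : p a <;> simp <;> omega

theorem pvFilter_length_lt {p q : String → Bool} (U : List String) (v : String)
    (hv : v ∈ U) (hpv : p v = true) (hqv : q v = false)
    (himp : ∀ x, q x = true → p x = true) :
    (U.filter q).length < (U.filter p).length := by
  induction U with
  | nil => cases hv
  | cons a t ih =>
    rcases List.mem_cons.1 hv with rfl | hvt
    · rw [List.filter_cons, List.filter_cons, hpv, hqv]
      have := pvFilter_length_le (p := p) (q := q) t himp
      simp; omega
    · have h2 := ih hvt
      by_cases hq : q a = true
      · simp [hq, himp a hq]; omega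
      · simp only [Bool.not_eq_true] at hq
        rw [List.filter_cons, List.filter_cons, hq]
        cases hp : p a <;> simp <;> omega

theorem pvContains_mono {s t : PySem.Set String} (hsub : s ⊆ t) (x : String)
    (hx : PySem.Set.contains s x = true) : PySem.Set.contains t x = true :=
  (pvContains_iff t x).2 (hsub ((pvContains_iff s x).1 hx))

theorem pvSubset_add (s : PySem.Set String) (v : String) : s ⊆ PySem.Set.add s v := by
  unfold PySem.Set.add
  split
  · exact fun a ha => ha
  · exact fun a ha => List.mem_append_left _ ha

theorem pvUnvis_le_of_subset (U : List String) {s t : PySem.Set String} (hsub : s ⊆ t) :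
    pvUnvis U t ≤ pvUnvis U s := by
  apply pvFilter_length_le
  intro x hx
  simp only [Bool.not_eq_true'] at *
  cases hc : PySem.Set.contains s x
  · rfl
  · rw [pvContains_mono hsub x hc] at hx; cases hx

theorem pvUnvis_add_lt (U : List String) (s : PySem.Set String) (v : String)
    (hv : v ∈ U) (hc : ¬ PySem.Set.contains s v = true) :
    pvUnvis U (PySem.Set.add s v) < pvUnvis U s := by
  apply pvFilter_length_lt U v hv
  · show (!PySem.Set.contains s v) = true
    cases h : PySem.Set.contains s v
    · rfl
    · exact absurd h hc
  · show (!PySem.Set.contains (PySem.Set.add s v) v) = false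
    have h2 : PySem.Set.contains (PySem.Set.add s v) v = true :=
      (pvContains_iff _ v).2 ((PySem.Set.mem_add _ _ _).2 (Or.inr rfl))
    rw [h2]; rfl
  · intro x hx
    simp only [Bool.not_eq_true'] at *
    cases hcx : PySem.Set.contains s x
    · rfl
    · rw [pvContains_mono (pvSubset_add s v) x hcx] at hx; cases hx

-- every element of the folded stack comes from the old stack or is a pushed neighbor
theorem pvMem_foldl_push {α β : Type} (l : List α) (rest : List β) (f : α → β) (keep : α → Bool) :
    ∀ e ∈ l.foldl (fun st x => if keep x then st else f x :: st) rest,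
      e ∈ rest ∨ ∃ x ∈ l, e = f x := by
  induction l generalizing rest with
  | nil => intro e he; exact Or.inl he
  | cons a t ih =>
    intro e he
    simp only [List.foldl_cons] at he
    rcases ih _ e he with h | ⟨x, hx, rfl⟩
    · split at h
      · exact Or.inl h
      · rcases List.mem_cons.1 h with rfl | h'
        · exact Or.inr ⟨a, List.mem_cons_self .., rfl⟩
        · exact Or.inl h'
    · exact Or.inr ⟨x, List.mem_cons_of_mem _ hx, rfl⟩

-- a neighbor row looked up in the edges dict lies in the flatMap universe
theorem pvMem_getD_univ (origin : String) (edges : List (String × List (String × Int)))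
    (k : String) (x : String × Int)
    (hx : x ∈ PySem.Dict.getD (PySem.Dict.mk edges) k []) : x.1 ∈ pvUniv origin edges := by
  unfold pvUniv
  apply List.mem_cons_of_mem
  induction edges with
  | nil => simp [PySem.Dict.getD, PySem.Dict.get?] at hx
  | cons p t ih =>
    rw [PySem.Dict.getD_eq_get?_getD, PySem.Dict.get?_mk_cons] at hx
    by_cases hk : (p.1 == k) = true
    · simp only [hk, if_pos] at hx
      simp only [Option.getD_some] at hx
      simp only [List.flatMap_cons, List.mem_append]
      exact Or.inl (List.mem_map_of_mem hx)
    · simp only [hk, if_neg, Bool.false_eq_true, not_false_iff] at hx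
      rw [← PySem.Dict.getD_eq_get?_getD] at hx
      simp only [List.flatMap_cons, List.mem_append]
      exact Or.inr (ih hx)

-- literal port of A's while loop; `U`/`hU`/`hst` are termination bookkeeping only
def dfsLoopA (destinations : List String) (edges : List (String × List (String × Int)))
    (U : List String)
    (hU : ∀ k x, x ∈ PySem.Dict.getD (PySem.Dict.mk edges) k [] → x.1 ∈ U)
    (stack : List (String × List String)) (visited : PySem.Set String) (n : Int)
    (hst : ∀ e ∈ stack, e.1 ∈ U) : Option String × Int × List String :=
  match stack with
  | [] => (none, n, [])
  | (current, path) :: rest =>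
    if hc : PySem.Set.contains visited current then
      dfsLoopA destinations edges U hU rest visited n
        (fun e he => hst e (List.mem_cons_of_mem _ he))
    else
      let visited' := PySem.Set.add visited current
      let n' := n + 1
      if current ∈ destinations then (some current, n', path)
      else
        dfsLoopA destinations edges U hU
          ((PySem.List.sorted (PySem.Dict.getD (PySem.Dict.mk edges) current []) (fun x => x.1) true).foldl
            (fun st nb => if PySem.Set.contains visited' nb.1 then st else (nb.1, path ++ [nb.1]) :: st) rest)
          visited' n'
          (by
            intro e he
            rcases pvMem_foldl_push _ _ _ _ e he with h | ⟨x, hx, rfl⟩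
            · exact hst e (List.mem_cons_of_mem _ h)
            · exact hU current x ((PySem.List.mem_sorted _ _ _ _).1 hx))
  termination_by (pvUnvis U visited, stack.length)
  decreasing_by
  · exact Prod.Lex.right _ (by simp)
  · exact Prod.Lex.left _ _ (pvUnvis_add_lt U visited current (hst (current, path) (List.mem_cons_self ..)) hc)

def dfs (origin : String) (destinations : List String) (edges : List (String × List (String × Int))) : Option String × Int × List String :=
  dfsLoopA destinations edges (pvUniv origin edges) (pvMem_getD_univ origin edges)
    [(origin, [origin])] PySem.Set.empty 0
    (by intro e he; simp at he; subst he; exact List.mem_cons_self ..)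

-- ===== PORT B =====
-- recursive visit / neighbor loop; results carry the `visited ⊆ result.visited` fact needed
-- for termination of the sibling loop
mutual
def visitB (destinations : List String) (edges : List (String × List (String × Int)))
    (U : List String)
    (hU : ∀ k x, x ∈ PySem.Dict.getD (PySem.Dict.mk edges) k [] → x.1 ∈ U)
    (node : String) (path : List String) (visited : PySem.Set String) (n : Int)
    (hvU : node ∈ U) :
    {o : Option (String × Int × List String) × PySem.Set String × Int // visited ⊆ o.2.1} :=
  if hc : PySem.Set.contains visited node then ⟨(none, visited, n), fun a ha => ha⟩
  else
    let visited' := PySem.Set.add visited node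
    let n' := n + 1
    if node ∈ destinations then ⟨(some (node, n', path), visited', n'), pvSubset_add visited node⟩
    else
      let r := goChildrenB destinations edges U hU
        (PySem.List.sorted (PySem.Dict.getD (PySem.Dict.mk edges) node []) (fun x => x.1) false)
        path visited' n'
        (fun c hc' => hU node c ((PySem.List.mem_sorted _ _ _ _).1 hc'))
      ⟨r.1, fun a ha => r.2 (pvSubset_add visited node ha)⟩
  termination_by (pvUnvis U visited, 0)
  decreasing_by
  · exact Prod.Lex.left _ _ (pvUnvis_add_lt U visited node hvU hc)

def goChildrenB (destinations : List String) (edges : List (String × List (String × Int)))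
    (U : List String)
    (hU : ∀ k x, x ∈ PySem.Dict.getD (PySem.Dict.mk edges) k [] → x.1 ∈ U)
    (cs : List (String × Int)) (path : List String) (visited : PySem.Set String) (n : Int)
    (hcs : ∀ c ∈ cs, c.1 ∈ U) :
    {o : Option (String × Int × List String) × PySem.Set String × Int // visited ⊆ o.2.1} :=
  match cs with
  | [] => ⟨(none, visited, n), fun a ha => ha⟩
  | c :: cs' =>
    if PySem.Set.contains visited c.1 then
      goChildrenB destinations edges U hU cs' path visited n
        (fun d hd => hcs d (List.mem_cons_of_mem _ hd))
    else
      match visitB destinations edges U hU c.1 (path ++ [c.1]) visited n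
          (hcs c (List.mem_cons_self ..)) with
      | ⟨(some t, s₂, n₂), hsub⟩ => ⟨(some t, s₂, n₂), hsub⟩
      | ⟨(none, s₂, n₂), hsub⟩ =>
        let r2 := goChildrenB destinations edges U hU cs' path s₂ n₂
          (fun d hd => hcs d (List.mem_cons_of_mem _ hd))
        ⟨r2.1, fun a ha => r2.2 (hsub ha)⟩
  termination_by (pvUnvis U visited, cs.length + 1)
  decreasing_by
  · exact Prod.Lex.right _ (by simp only [List.length_cons]; omega)
  · exact Prod.Lex.right _ (by simp only [List.length_cons]; omega)
  · rcases lt_or_eq_of_le (pvUnvis_le_of_subset U (s := visited) (t := s₂) hsub) with h | h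
    · exact Prod.Lex.left _ _ h
    · rw [h]; exact Prod.Lex.right _ (by simp only [List.length_cons]; omega)
end

def dfs_alt (origin : String) (destinations : List String) (edges : List (String × List (String × Int))) : Option String × Int × List String :=
  match visitB destinations edges (pvUniv origin edges) (pvMem_getD_univ origin edges)
      origin [origin] PySem.Set.empty 0 (List.mem_cons_self ..) with
  | ⟨(some t, _, _), _⟩ => (some t.1, t.2.1, t.2.2)
  | ⟨(none, _, nf), _⟩ => (none, nf, [])

-- ===== PRECONDITION & SPEC =====
def Spec_dfs (origin : String) (destinations : List String) (edges : List (String × List (String × Int))) (out : Option String × Int × List String) : Prop := out = dfs_alt origin destinations edges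
instance (origin : String) (destinations : List String) (edges : List (String × List (String × Int))) (out : Option String × Int × List String) : Decidable (Spec_dfs origin destinations edges out) := by unfold Spec_dfs; infer_instance

-- ===== CLAIM (what is proved, stated in full; the proofs are below) =====
def Claim_equal_dfs : Prop := ∀ (origin : String) (destinations : List String) (edges : List (String × List (String × Int))), Dom_dfs origin destinations edges → Spec_dfs origin destinations edges (dfs origin destinations edges)

-- ===== LEMMAS AND PROOFS =====

theorem pvNotMem_of_contains_false (s : PySem.Set String) (x : String)
    (h : PySem.Set.contains s x = false) : x ∉ s := by
  intro m
  rw [(pvContains_iff s x).2 m] at h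
  simp at h


-- continuation combinators over a (result?, visited, count) triple
def pvStep (o : Option (String × Int × List String) × PySem.Set String × Int)
    (k : PySem.Set String → Int → Option String × Int × List String) :
    Option String × Int × List String :=
  match o.1 with
  | some t => (some t.1, t.2.1, t.2.2)
  | none => k o.2.1 o.2.2

def pvGStep (o : Option (String × Int × List String) × PySem.Set String × Int)
    (k : PySem.Set String → Int → Option (String × Int × List String) × PySem.Set String × Int) :
    Option (String × Int × List String) × PySem.Set String × Int :=
  match o.1 with
  | some t => (some t, o.2.1, o.2.2)
  | none => k o.2.1 o.2.2

-- the push filter A applies to a (neighbor, cost) pair, as a filterMap function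
def pvF (sF : PySem.Set String) (path : List String) (c : String × Int) :
    Option (String × List String) :=
  if PySem.Set.contains sF c.1 then none else some (c.1, path ++ [c.1])

-- proof-side bridge: run A's stack as a sequence of recursive visits
def runListB (destinations : List String) (edges : List (String × List (String × Int)))
    (U : List String)
    (hU : ∀ k x, x ∈ PySem.Dict.getD (PySem.Dict.mk edges) k [] → x.1 ∈ U)
    (stack : List (String × List String)) (visited : PySem.Set String) (n : Int)
    (hst : ∀ e ∈ stack, e.1 ∈ U) : Option String × Int × List String :=
  match stack with
  | [] => (none, n, [])
  | (v, p) :: rest =>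
    pvStep (visitB destinations edges U hU v p visited n (hst (v, p) (List.mem_cons_self ..))).1
      (fun s₂ n₂ => runListB destinations edges U hU rest s₂ n₂
        (fun e he => hst e (List.mem_cons_of_mem _ he)))

-- unfolding lemmas for visitB / goChildrenB (first components only)
theorem visitB_fst_visited (destinations : List String) (edges : List (String × List (String × Int)))
    (U : List String) (hU : ∀ k x, x ∈ PySem.Dict.getD (PySem.Dict.mk edges) k [] → x.1 ∈ U)
    (node : String) (path : List String) (visited : PySem.Set String) (n : Int) (hvU : node ∈ U)
    (hc : PySem.Set.contains visited node = true) :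
    (visitB destinations edges U hU node path visited n hvU).1 = (none, visited, n) := by
  rw [visitB]
  simp [(pvContains_iff _ _).1 hc]

theorem visitB_fst_dest (destinations : List String) (edges : List (String × List (String × Int)))
    (U : List String) (hU : ∀ k x, x ∈ PySem.Dict.getD (PySem.Dict.mk edges) k [] → x.1 ∈ U)
    (node : String) (path : List String) (visited : PySem.Set String) (n : Int) (hvU : node ∈ U)
    (hc : ¬ PySem.Set.contains visited node = true) (hd : node ∈ destinations) :
    (visitB destinations edges U hU node path visited n hvU).1
      = (some (node, n + 1, path), PySem.Set.add visited node, n + 1) := by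
  rw [visitB]
  have hm : node ∉ visited := fun m => hc ((pvContains_iff _ _).2 m)
  simp [hm, hd]

theorem visitB_fst_rec (destinations : List String) (edges : List (String × List (String × Int)))
    (U : List String) (hU : ∀ k x, x ∈ PySem.Dict.getD (PySem.Dict.mk edges) k [] → x.1 ∈ U)
    (node : String) (path : List String) (visited : PySem.Set String) (n : Int) (hvU : node ∈ U)
    (hc : ¬ PySem.Set.contains visited node = true) (hd : node ∉ destinations) :
    (visitB destinations edges U hU node path visited n hvU).1
      = (goChildrenB destinations edges U hU
          (PySem.List.sorted (PySem.Dict.getD (PySem.Dict.mk edges) node []) (fun x => x.1) false)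
          path (PySem.Set.add visited node) (n + 1)
          (fun c hc' => hU node c ((PySem.List.mem_sorted _ _ _ _).1 hc'))).1 := by
  rw [visitB]
  have hm : node ∉ visited := fun m => hc ((pvContains_iff _ _).2 m)
  simp [hm, hd]

theorem gc_nil (destinations : List String) (edges : List (String × List (String × Int)))
    (U : List String) (hU : ∀ k x, x ∈ PySem.Dict.getD (PySem.Dict.mk edges) k [] → x.1 ∈ U)
    (path : List String) (visited : PySem.Set String) (n : Int) (hcs : ∀ c ∈ ([] : List (String × Int)), c.1 ∈ U) :
    (goChildrenB destinations edges U hU [] path visited n hcs).1 = (none, visited, n) := by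
  rw [goChildrenB]

theorem gc_cons_vis (destinations : List String) (edges : List (String × List (String × Int)))
    (U : List String) (hU : ∀ k x, x ∈ PySem.Dict.getD (PySem.Dict.mk edges) k [] → x.1 ∈ U)
    (c : String × Int) (cs' : List (String × Int)) (path : List String) (visited : PySem.Set String)
    (n : Int) (hcs : ∀ d ∈ c :: cs', d.1 ∈ U)
    (hc : PySem.Set.contains visited c.1 = true) :
    (goChildrenB destinations edges U hU (c :: cs') path visited n hcs).1
      = (goChildrenB destinations edges U hU cs' path visited n
          (fun d hd => hcs d (List.mem_cons_of_mem _ hd))).1 := by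
  rw [goChildrenB]
  simp [(pvContains_iff _ _).1 hc]

theorem gc_cons_new (destinations : List String) (edges : List (String × List (String × Int)))
    (U : List String) (hU : ∀ k x, x ∈ PySem.Dict.getD (PySem.Dict.mk edges) k [] → x.1 ∈ U)
    (c : String × Int) (cs' : List (String × Int)) (path : List String) (visited : PySem.Set String)
    (n : Int) (hcs : ∀ d ∈ c :: cs', d.1 ∈ U)
    (hc : ¬ PySem.Set.contains visited c.1 = true) :
    (goChildrenB destinations edges U hU (c :: cs') path visited n hcs).1
      = pvGStep (visitB destinations edges U hU c.1 (path ++ [c.1]) visited n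
          (hcs c (List.mem_cons_self ..))).1
          (fun s₂ n₂ => (goChildrenB destinations edges U hU cs' path s₂ n₂
            (fun d hd => hcs d (List.mem_cons_of_mem _ hd))).1) := by
  rw [goChildrenB]
  rw [if_neg hc]
  rcases hval : visitB destinations edges U hU c.1 (path ++ [c.1]) visited n
      (hcs c (List.mem_cons_self ..)) with ⟨⟨res, s₂, n₂⟩, hsub⟩
  cases res <;> simp [pvGStep]

-- A's descending foldl-push equals an ascending filterMap prepended to the old stack
theorem pv_foldl_push (s' : PySem.Set String) (path : List String) (l : List (String × Int)) :
    ∀ (rest : List (String × List String)),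
    l.foldl (fun st nb => if PySem.Set.contains s' nb.1 then st else (nb.1, path ++ [nb.1]) :: st) rest
      = (l.reverse.filterMap (pvF s' path)) ++ rest := by
  induction l with
  | nil => intro rest; simp
  | cons a t ih =>
    intro rest
    rw [List.foldl_cons]
    cases hca : PySem.Set.contains s' a.1
    · have hm : a.1 ∉ s' := pvNotMem_of_contains_false _ _ hca
      rw [if_neg (by simp [hca]), ih]
      simp [pvF, hm, List.append_assoc]
    · have hm : a.1 ∈ s' := (pvContains_iff _ _).1 hca
      rw [if_pos (by simp [hca]), ih]
      simp [pvF, hm]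

theorem pv_desc_rev_fst (l : List (String × Int)) :
    ((PySem.List.sorted l (fun x => x.1) true).reverse.map Prod.fst)
      = ((PySem.List.sorted l (fun x => x.1) false).map Prod.fst) := by
  apply List.Perm.eq_of_pairwise (le := (· ≤ · : String → String → Prop))
  · exact fun a b _ _ h1 h2 => le_antisymm h1 h2
  · rw [List.pairwise_map, List.pairwise_reverse]
    exact PySem.List.sorted_pairwise_rev l (fun x => x.1)
  · rw [List.pairwise_map]
    exact PySem.List.sorted_pairwise l (fun x => x.1)
  · exact List.Perm.map _ (((PySem.List.sorted l (fun x => x.1) true).reverse_perm.trans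
      (PySem.List.sorted_perm l (fun x => x.1) true)).trans
      (PySem.List.sorted_perm l (fun x => x.1) false).symm)

theorem pv_filterMap_fst (l₁ l₂ : List (String × Int))
    (h : l₁.map Prod.fst = l₂.map Prod.fst) (G : String → Option (String × List String)) :
    l₁.filterMap (fun c => G c.1) = l₂.filterMap (fun c => G c.1) := by
  have e1 : ∀ (l : List (String × Int)),
      l.filterMap (fun c => G c.1) = (l.map Prod.fst).filterMap G := by
    intro l
    rw [List.filterMap_map]
    rfl
  rw [e1, e1, h]

-- specializations/helpers used by the pv_children / pv_main inductions
theorem pv_filterMap_pvF (sF : PySem.Set String) (path : List String)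
    (l₁ l₂ : List (String × Int)) (h : l₁.map Prod.fst = l₂.map Prod.fst) :
    l₁.filterMap (pvF sF path) = l₂.filterMap (pvF sF path) :=
  pv_filterMap_fst l₁ l₂ h
    (fun x => if PySem.Set.contains sF x then none else some (x, path ++ [x]))

theorem runListB_cons (destinations : List String) (edges : List (String × List (String × Int)))
    (U : List String) (hU : ∀ k x, x ∈ PySem.Dict.getD (PySem.Dict.mk edges) k [] → x.1 ∈ U)
    (v : String) (p : List String) (rest : List (String × List String))
    (visited : PySem.Set String) (n : Int)
    (H : ∀ e ∈ (v, p) :: rest, e.1 ∈ U) (hv : v ∈ U) (Ht : ∀ e ∈ rest, e.1 ∈ U) :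
    runListB destinations edges U hU ((v, p) :: rest) visited n H
      = pvStep (visitB destinations edges U hU v p visited n hv).1
          (fun s₂ n₂ => runListB destinations edges U hU rest s₂ n₂ Ht) := rfl

theorem runListB_congr (destinations : List String) (edges : List (String × List (String × Int)))
    (U : List String) (hU : ∀ k x, x ∈ PySem.Dict.getD (PySem.Dict.mk edges) k [] → x.1 ∈ U)
    {st₁ st₂ : List (String × List String)} (h : st₁ = st₂)
    (visited : PySem.Set String) (n : Int)
    (H₁ : ∀ e ∈ st₁, e.1 ∈ U) (H₂ : ∀ e ∈ st₂, e.1 ∈ U) :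
    runListB destinations edges U hU st₁ visited n H₁
      = runListB destinations edges U hU st₂ visited n H₂ := by
  subst h; rfl

theorem dfsLoopA_congr (destinations : List String) (edges : List (String × List (String × Int)))
    (U : List String) (hU : ∀ k x, x ∈ PySem.Dict.getD (PySem.Dict.mk edges) k [] → x.1 ∈ U)
    {st₁ st₂ : List (String × List String)} (h : st₁ = st₂)
    (visited : PySem.Set String) (n : Int)
    (H₁ : ∀ e ∈ st₁, e.1 ∈ U) (H₂ : ∀ e ∈ st₂, e.1 ∈ U) :
    dfsLoopA destinations edges U hU st₁ visited n H₁
      = dfsLoopA destinations edges U hU st₂ visited n H₂ := by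
  subst h; rfl

theorem pvMem_filterMap_pvF {U : List String} (sF : PySem.Set String) (path : List String)
    (cs : List (String × Int)) (rest : List (String × List String))
    (hcs : ∀ c ∈ cs, c.1 ∈ U) (Hrest : ∀ e ∈ rest, e.1 ∈ U) :
    ∀ e ∈ (cs.filterMap (pvF sF path)) ++ rest, e.1 ∈ U := by
  intro e he
  rcases List.mem_append.1 he with h | h
  · rcases List.mem_filterMap.1 h with ⟨d, hd, hde⟩
    have : e.1 = d.1 := by
      unfold pvF at hde
      split at hde
      · cases hde
      · cases hde; rfl
    rw [this]
    exact hcs d hd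
  · exact Hrest e h

-- core: running the pushed (ascending, frozen-filtered) entries equals the recursive child loop
theorem pv_children (destinations : List String) (edges : List (String × List (String × Int)))
    (U : List String) (hU : ∀ k x, x ∈ PySem.Dict.getD (PySem.Dict.mk edges) k [] → x.1 ∈ U)
    (sF : PySem.Set String) (path : List String) (rest : List (String × List String))
    (Hrest : ∀ e ∈ rest, e.1 ∈ U) :
    ∀ (cs : List (String × Int)) (s : PySem.Set String) (n : Int)
      (hcs : ∀ c ∈ cs, c.1 ∈ U)
      (H : ∀ e ∈ (cs.filterMap (pvF sF path)) ++ rest, e.1 ∈ U)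
      (_ : sF ⊆ s),
    runListB destinations edges U hU ((cs.filterMap (pvF sF path)) ++ rest) s n H
      = pvStep (goChildrenB destinations edges U hU cs path s n hcs).1
          (fun s₂ n₂ => runListB destinations edges U hU rest s₂ n₂ Hrest) := by
  intro cs
  induction cs with
  | nil =>
    intro s n hcs H hsub
    simp only [List.filterMap_nil, List.nil_append]
    rw [gc_nil]
    rfl
  | cons c cs' ih =>
    intro s n hcs H hsub
    have hcs' : ∀ d ∈ cs', d.1 ∈ U := fun d hd => hcs d (List.mem_cons_of_mem _ hd)
    by_cases hcF : PySem.Set.contains sF c.1 = true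
    · have hstep : pvF sF path c = none := by simp [pvF, (pvContains_iff _ _).1 hcF]
      rw [runListB_congr destinations edges U hU
        (show List.filterMap (pvF sF path) (c :: cs') ++ rest
            = List.filterMap (pvF sF path) cs' ++ rest by rw [List.filterMap_cons, hstep]) s n H
        (pvMem_filterMap_pvF sF path cs' rest hcs' Hrest)]
      rw [gc_cons_vis destinations edges U hU c cs' path s n hcs (pvContains_mono hsub c.1 hcF)]
      exact ih s n hcs' (pvMem_filterMap_pvF sF path cs' rest hcs' Hrest) hsub
    · have hcF' : PySem.Set.contains sF c.1 = false := by
        cases h : PySem.Set.contains sF c.1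
        · rfl
        · exact absurd h hcF
      have hstep : pvF sF path c = some (c.1, path ++ [c.1]) := by
        simp [pvF, pvNotMem_of_contains_false _ _ hcF']
      have Hcons : ∀ e ∈ (c.1, path ++ [c.1]) :: (List.filterMap (pvF sF path) cs' ++ rest), e.1 ∈ U := by
        intro e he
        rcases List.mem_cons.1 he with rfl | h
        · exact hcs c (List.mem_cons_self ..)
        · exact pvMem_filterMap_pvF sF path cs' rest hcs' Hrest e h
      rw [runListB_congr destinations edges U hU
        (show List.filterMap (pvF sF path) (c :: cs') ++ rest
            = (c.1, path ++ [c.1]) :: (List.filterMap (pvF sF path) cs' ++ rest) by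
          rw [List.filterMap_cons, hstep]; rfl) s n H Hcons]
      rw [runListB_cons destinations edges U hU c.1 (path ++ [c.1]) _ s n Hcons
        (hcs c (List.mem_cons_self ..)) (pvMem_filterMap_pvF sF path cs' rest hcs' Hrest)]
      by_cases hcv : PySem.Set.contains s c.1 = true
      · rw [visitB_fst_visited destinations edges U hU c.1 (path ++ [c.1]) s n
          (hcs c (List.mem_cons_self ..)) hcv]
        rw [gc_cons_vis destinations edges U hU c cs' path s n hcs hcv]
        simp only [pvStep]
        exact ih s n hcs' (pvMem_filterMap_pvF sF path cs' rest hcs' Hrest) hsub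
      · rw [gc_cons_new destinations edges U hU c cs' path s n hcs hcv]
        rcases hval : visitB destinations edges U hU c.1 (path ++ [c.1]) s n
            (hcs c (List.mem_cons_self ..)) with ⟨⟨res, s₂, n₂⟩, hsub2⟩
        cases res with
        | some t => simp [pvStep, pvGStep]
        | none =>
          simp only [pvStep, pvGStep]
          exact ih s₂ n₂ hcs' (pvMem_filterMap_pvF sF path cs' rest hcs' Hrest)
            (fun a ha => hsub2 (hsub ha))

-- main: A's stack loop equals the visit-sequence semantics, by strong induction on
-- the number of unvisited universe nodes
theorem pv_main (destinations : List String) (edges : List (String × List (String × Int)))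
    (U : List String)
    (hU : ∀ k x, x ∈ PySem.Dict.getD (PySem.Dict.mk edges) k [] → x.1 ∈ U)
    (stack : List (String × List String)) (visited : PySem.Set String) (n : Int)
    (hst : ∀ e ∈ stack, e.1 ∈ U) :
    dfsLoopA destinations edges U hU stack visited n hst
      = runListB destinations edges U hU stack visited n hst := by
  suffices h : ∀ (k : Nat) (visited : PySem.Set String), pvUnvis U visited ≤ k →
      ∀ (stack : List (String × List String)) (n : Int) (hst : ∀ e ∈ stack, e.1 ∈ U),
      dfsLoopA destinations edges U hU stack visited n hst
        = runListB destinations edges U hU stack visited n hst by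
    exact h (pvUnvis U visited) visited le_rfl stack n hst
  intro k
  induction k using Nat.strong_induction_on with
  | _ k IHk =>
    intro visited hk stack
    induction stack with
    | nil =>
      intro n hst
      rw [dfsLoopA]
      rfl
    | cons hd rest ihrest =>
      obtain ⟨cur, path⟩ := hd
      intro n hst
      have hcurU : cur ∈ U := hst (cur, path) (List.mem_cons_self ..)
      have hrest : ∀ e ∈ rest, e.1 ∈ U := fun e he => hst e (List.mem_cons_of_mem _ he)
      rw [runListB_cons destinations edges U hU cur path rest visited n hst hcurU hrest]
      rw [dfsLoopA]
      by_cases hc : PySem.Set.contains visited cur = true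
      · rw [dif_pos hc]
        rw [visitB_fst_visited destinations edges U hU cur path visited n hcurU hc]
        simp only [pvStep]
        exact ihrest n hrest
      · rw [dif_neg hc]
        by_cases hdx : cur ∈ destinations
        · rw [if_pos hdx]
          rw [visitB_fst_dest destinations edges U hU cur path visited n hcurU hc hdx]
          rfl
        · rw [if_neg hdx]
          rw [visitB_fst_rec destinations edges U hU cur path visited n hcurU hc hdx]
          have hlt : pvUnvis U (PySem.Set.add visited cur) < pvUnvis U visited :=
            pvUnvis_add_lt U visited cur hcurU hc
          have hascU : ∀ c ∈ (PySem.List.sorted (PySem.Dict.getD (PySem.Dict.mk edges) cur [])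
              (fun x => x.1) false), c.1 ∈ U :=
            fun c hc' => hU cur c ((PySem.List.mem_sorted _ _ _ _).1 hc')
          have HH : ∀ e ∈ ((PySem.List.sorted (PySem.Dict.getD (PySem.Dict.mk edges) cur [])
                (fun x => x.1) false).filterMap (pvF (PySem.Set.add visited cur) path)) ++ rest,
              e.1 ∈ U :=
            pvMem_filterMap_pvF _ path _ rest hascU hrest
          have hstack : (PySem.List.sorted (PySem.Dict.getD (PySem.Dict.mk edges) cur [])
                (fun x => x.1) true).foldl
                (fun st nb => if PySem.Set.contains (PySem.Set.add visited cur) nb.1 then st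
                  else (nb.1, path ++ [nb.1]) :: st) rest
              = ((PySem.List.sorted (PySem.Dict.getD (PySem.Dict.mk edges) cur [])
                (fun x => x.1) false).filterMap (pvF (PySem.Set.add visited cur) path)) ++ rest := by
            rw [pv_foldl_push]
            exact congrArg (fun l => l ++ rest)
              (pv_filterMap_pvF (PySem.Set.add visited cur) path _ _ (pv_desc_rev_fst _))
          rw [dfsLoopA_congr destinations edges U hU hstack (PySem.Set.add visited cur) (n + 1) _ HH]
          rw [IHk (k - 1) (by omega) (PySem.Set.add visited cur) (by omega) _ (n + 1) HH]
          rw [pv_children destinations edges U hU (PySem.Set.add visited cur) path rest hrest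
            _ (PySem.Set.add visited cur) (n + 1) hascU HH (fun a ha => ha)]

-- ===== VERDICT (by name: the statement is the Claim_ definition above) =====
theorem dfs_spec : Claim_equal_dfs := by
  intro origin destinations edges _
  unfold Spec_dfs dfs dfs_alt
  rw [pv_main]
  rw [runListB_cons (edges := edges) (U := pvUniv origin edges)
    (hU := pvMem_getD_univ origin edges) (visited := PySem.Set.empty) (n := 0)
    (hv := List.mem_cons_self ..) (Ht := fun e he => absurd he (List.not_mem_nil))]
  rcases hval : visitB destinations edges (pvUniv origin edges) (pvMem_getD_univ origin edges)
      origin [origin] PySem.Set.empty 0 (List.mem_cons_self ..) with ⟨⟨res, s₂, n₂⟩, hs⟩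
  cases res <;> simp [pvStep, runListB]
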